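-- pv_equiv track=rewrite | github.com/HvcamposHAi/agroia-rmc | etapa2_itens_v4.py | categorizar
-- ===== SOURCE A (Python) =====
-- def categorizar(cultura: str) -> str:
--     """Retorna categoria da cultura."""
--     categorias = {
--         "FRUTA": {"abacaxi", "banana", "goiaba", "laranja", "limao", "maca",
--                   "mamao", "melancia", "morango", "uva", "kiwi"},
--         "LEGUME": {"tomate", "cebola", "cenoura", "batata", "aipim", "alho",
--                    "beterraba", "pimentao", "abobrinha", "chuchu", "milho", "inhame"},
--         "FOLHOSA": {"alface", "couve", "repolho", "brocolis"},
--         "LATICINIOS": {"queijo", "leite"},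
--         "PROTEINA": {"frango", "carne", "ovos"},
--         "GRAOS": {"arroz", "feijao", "mel", "pao"},
--     }
--     for cat, itens in categorias.items():
--         if cultura in itens:
--             return cat
--     return "OUTRO"
-- ===== SOURCE B (Python) =====
-- # Flat inverted index: one dict lookup instead of scanning categories.
-- _CATEGORIA_POR_ITEM = {
--     "abacaxi": "FRUTA",
--     "banana": "FRUTA",
--     "goiaba": "FRUTA",
--     "laranja": "FRUTA",
--     "limao": "FRUTA",
--     "maca": "FRUTA",
--     "mamao": "FRUTA",
--     "melancia": "FRUTA",
--     "morango": "FRUTA",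
--     "uva": "FRUTA",
--     "kiwi": "FRUTA",
--     "tomate": "LEGUME",
--     "cebola": "LEGUME",
--     "cenoura": "LEGUME",
--     "batata": "LEGUME",
--     "aipim": "LEGUME",
--     "alho": "LEGUME",
--     "beterraba": "LEGUME",
--     "pimentao": "LEGUME",
--     "abobrinha": "LEGUME",
--     "chuchu": "LEGUME",
--     "milho": "LEGUME",
--     "inhame": "LEGUME",
--     "alface": "FOLHOSA",
--     "couve": "FOLHOSA",
--     "repolho": "FOLHOSA",
--     "brocolis": "FOLHOSA",
--     "queijo": "LATICINIOS",
--     "leite": "LATICINIOS",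
--     "frango": "PROTEINA",
--     "carne": "PROTEINA",
--     "ovos": "PROTEINA",
--     "arroz": "GRAOS",
--     "feijao": "GRAOS",
--     "mel": "GRAOS",
--     "pao": "GRAOS",
-- }
--
--
-- def categorizar(cultura: str) -> str:
--     """Retorna categoria da cultura."""
--     return _CATEGORIA_POR_ITEM.get(cultura, "OUTRO")
-- ===== Notes on version B (the rewrite author's own statement) =====
-- stated objective: simpler
-- what changed: Replaced the loop over categories with inner set-membership tests by a single flat item-to-category dict built once, so the function body is one dict .get with the fallback category as default.
import Mathlib
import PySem

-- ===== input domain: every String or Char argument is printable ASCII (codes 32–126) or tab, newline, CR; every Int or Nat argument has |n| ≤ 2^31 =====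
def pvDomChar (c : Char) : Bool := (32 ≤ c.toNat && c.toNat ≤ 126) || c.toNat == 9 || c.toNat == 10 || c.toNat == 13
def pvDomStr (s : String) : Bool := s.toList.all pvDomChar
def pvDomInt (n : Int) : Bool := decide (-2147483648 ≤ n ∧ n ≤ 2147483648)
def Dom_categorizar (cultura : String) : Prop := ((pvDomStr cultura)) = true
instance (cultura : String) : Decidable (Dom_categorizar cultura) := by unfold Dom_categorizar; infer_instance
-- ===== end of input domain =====

-- ===== PORT A =====
-- B replaces A's category-scanning loop with one precomputed item->category dict lookup (simpler).
def pvCatsA : List (String × PySem.Set String) :=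
  [("FRUTA", PySem.Set.ofList ["abacaxi", "banana", "goiaba", "laranja", "limao", "maca", "mamao", "melancia", "morango", "uva", "kiwi"]),
   ("LEGUME", PySem.Set.ofList ["tomate", "cebola", "cenoura", "batata", "aipim", "alho", "beterraba", "pimentao", "abobrinha", "chuchu", "milho", "inhame"]),
   ("FOLHOSA", PySem.Set.ofList ["alface", "couve", "repolho", "brocolis"]),
   ("LATICINIOS", PySem.Set.ofList ["queijo", "leite"]),
   ("PROTEINA", PySem.Set.ofList ["frango", "carne", "ovos"]),
   ("GRAOS", PySem.Set.ofList ["arroz", "feijao", "mel", "pao"])]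
def pvLoopA (cultura : String) : List (String × PySem.Set String) → String
  | [] => "OUTRO"
  | (cat, itens) :: rest => if PySem.Set.contains itens cultura then cat else pvLoopA cultura rest

def categorizar (cultura : String) : String := pvLoopA cultura pvCatsA

-- ===== PORT B =====
def pvFlatB : PySem.Dict String String :=
  PySem.Dict.mk [("abacaxi", "FRUTA"),
    ("banana", "FRUTA"),
    ("goiaba", "FRUTA"),
    ("laranja", "FRUTA"),
    ("limao", "FRUTA"),
    ("maca", "FRUTA"),
    ("mamao", "FRUTA"),
    ("melancia", "FRUTA"),
    ("morango", "FRUTA"),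
    ("uva", "FRUTA"),
    ("kiwi", "FRUTA"),
    ("tomate", "LEGUME"),
    ("cebola", "LEGUME"),
    ("cenoura", "LEGUME"),
    ("batata", "LEGUME"),
    ("aipim", "LEGUME"),
    ("alho", "LEGUME"),
    ("beterraba", "LEGUME"),
    ("pimentao", "LEGUME"),
    ("abobrinha", "LEGUME"),
    ("chuchu", "LEGUME"),
    ("milho", "LEGUME"),
    ("inhame", "LEGUME"),
    ("alface", "FOLHOSA"),
    ("couve", "FOLHOSA"),
    ("repolho", "FOLHOSA"),
    ("brocolis", "FOLHOSA"),
    ("queijo", "LATICINIOS"),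
    ("leite", "LATICINIOS"),
    ("frango", "PROTEINA"),
    ("carne", "PROTEINA"),
    ("ovos", "PROTEINA"),
    ("arroz", "GRAOS"),
    ("feijao", "GRAOS"),
    ("mel", "GRAOS"),
    ("pao", "GRAOS")]

def categorizar_alt (cultura : String) : String := PySem.Dict.getD pvFlatB cultura "OUTRO"

-- ===== PRECONDITION & SPEC =====
def Spec_categorizar (cultura : String) (out : String) : Prop := out = categorizar_alt cultura
instance (cultura : String) (out : String) : Decidable (Spec_categorizar cultura out) := by unfold Spec_categorizar; infer_instance

-- ===== CLAIM (what is proved, stated in full; the proofs are below) =====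
def Claim_equal_categorizar : Prop := ∀ (cultura : String), Dom_categorizar cultura → Spec_categorizar cultura (categorizar cultura)

-- ===== LEMMAS AND PROOFS =====

-- ===== VERDICT (by name: the statement is the Claim_ definition above) =====
set_option maxRecDepth 16384 in
theorem categorizar_spec : Claim_equal_categorizar := by
  intro cultura _
  unfold Spec_categorizar
  by_cases h0 : cultura = "abacaxi"
  · subst h0; rfl
  by_cases h1 : cultura = "banana"
  · subst h1; rfl
  by_cases h2 : cultura = "goiaba"
  · subst h2; rfl
  by_cases h3 : cultura = "laranja"
  · subst h3; rfl
  by_cases h4 : cultura = "limao"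
  · subst h4; rfl
  by_cases h5 : cultura = "maca"
  · subst h5; rfl
  by_cases h6 : cultura = "mamao"
  · subst h6; rfl
  by_cases h7 : cultura = "melancia"
  · subst h7; rfl
  by_cases h8 : cultura = "morango"
  · subst h8; rfl
  by_cases h9 : cultura = "uva"
  · subst h9; rfl
  by_cases h10 : cultura = "kiwi"
  · subst h10; rfl
  by_cases h11 : cultura = "tomate"
  · subst h11; rfl
  by_cases h12 : cultura = "cebola"
  · subst h12; rfl
  by_cases h13 : cultura = "cenoura"
  · subst h13; rfl
  by_cases h14 : cultura = "batata"
  · subst h14; rfl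
  by_cases h15 : cultura = "aipim"
  · subst h15; rfl
  by_cases h16 : cultura = "alho"
  · subst h16; rfl
  by_cases h17 : cultura = "beterraba"
  · subst h17; rfl
  by_cases h18 : cultura = "pimentao"
  · subst h18; rfl
  by_cases h19 : cultura = "abobrinha"
  · subst h19; rfl
  by_cases h20 : cultura = "chuchu"
  · subst h20; rfl
  by_cases h21 : cultura = "milho"
  · subst h21; rfl
  by_cases h22 : cultura = "inhame"
  · subst h22; rfl
  by_cases h23 : cultura = "alface"
  · subst h23; rfl
  by_cases h24 : cultura = "couve"
  · subst h24; rfl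
  by_cases h25 : cultura = "repolho"
  · subst h25; rfl
  by_cases h26 : cultura = "brocolis"
  · subst h26; rfl
  by_cases h27 : cultura = "queijo"
  · subst h27; rfl
  by_cases h28 : cultura = "leite"
  · subst h28; rfl
  by_cases h29 : cultura = "frango"
  · subst h29; rfl
  by_cases h30 : cultura = "carne"
  · subst h30; rfl
  by_cases h31 : cultura = "ovos"
  · subst h31; rfl
  by_cases h32 : cultura = "arroz"
  · subst h32; rfl
  by_cases h33 : cultura = "feijao"
  · subst h33; rfl
  by_cases h34 : cultura = "mel"
  · subst h34; rfl
  by_cases h35 : cultura = "pao"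
  · subst h35; rfl
  simp [categorizar, pvLoopA, pvCatsA, categorizar_alt, pvFlatB, PySem.Set.contains,
        PySem.Dict.getD, PySem.Dict.get?,
        Ne.symm h0, Ne.symm h1, Ne.symm h2, Ne.symm h3, Ne.symm h4, Ne.symm h5, Ne.symm h6, Ne.symm h7, Ne.symm h8, Ne.symm h9, Ne.symm h10, Ne.symm h11, Ne.symm h12, Ne.symm h13, Ne.symm h14, Ne.symm h15, Ne.symm h16, Ne.symm h17, Ne.symm h18, Ne.symm h19, Ne.symm h20, Ne.symm h21, Ne.symm h22, Ne.symm h23, Ne.symm h24, Ne.symm h25, Ne.symm h26, Ne.symm h27, Ne.symm h28, Ne.symm h29, Ne.symm h30, Ne.symm h31, Ne.symm h32, Ne.symm h33, Ne.symm h34, Ne.symm h35, h0, h1, h2, h3, h4, h5, h6, h7, h8, h9, h10, h11, h12, h13, h14, h15, h16, h17, h18, h19, h20, h21, h22, h23, h24, h25, h26, h27, h28, h29, h30, h31, h32, h33, h34, h35]
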